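-- pv_equiv track=rewrite | github.com/goldsergeant/Algorithm-problem-solving | 프로그래머스/4/118670. 행렬과 연산/행렬과 연산.py | solution
-- ===== SOURCE A (Python) =====
-- import collections
--
-- def solution(rc, operations):
--     answer = []
--     rows=collections.deque([collections.deque(rc[i][1:-1]) for i in range(len(rc))])
--     left_col = collections.deque([rc[i][0] for i in range(len(rc))])
--     right_col = collections.deque([rc[i][-1] for i in range(len(rc))])
--
--     def rotate():
--         left_top=left_col.popleft()
--         rows[0].appendleft(left_top)
--
--         right_top=rows[0].pop()
--         right_col.appendleft(right_top)
--
--         right_bottom=right_col.pop()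
--         rows[-1].append(right_bottom)
--
--         left_bottom=rows[-1].popleft()
--         left_col.append(left_bottom)
--
--     def shift_row():
--         rows.rotate(1)
--         left_col.rotate(1)
--         right_col.rotate(1)
--
--     for op in operations:
--         if op=='Rotate':
--             rotate()
--         else:
--             shift_row()
--
--     for i in range(len(rows)):
--         answer.append([left_col.popleft()]+list(rows[i])+[right_col.popleft()])
--
--     return answer
-- ===== SOURCE B (Python) =====
-- def solution(rc, operations):
--     m = [list(row) for row in rc]
--     for op in operations:
--         if op == 'Rotate':
--             top, middles, bottom = m[0], m[1:-1], m[-1]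
--             heads = [row[0] for row in middles] + [bottom[0]]
--             lasts = [top[-1]] + [row[-1] for row in middles]
--             new = [[heads[0]] + top[:-1]]
--             for row, h, l in zip(middles, heads[1:], lasts):
--                 new.append([h] + row[1:-1] + [l])
--             new.append(bottom[1:] + [lasts[-1]])
--             m = new
--         else:
--             m = [m[-1]] + m[:-1]
--     return m
-- ===== Notes on version B (the rewrite author's own statement) =====
-- stated objective: simpler
-- what changed: B keeps the whole matrix as one list of row lists rebuilt per operation with explicit border-shift row formulas, instead of A's three mutable deques (middle rows, left column, right column) with pop/append choreography; Pre_ excludes matrices with fewer than 2 rows (A raises on an empty matrix with a Rotate, and a single aliased top/bottom row gives an accidental shape) and with an empty row (A raises IndexError).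
-- intended difference: On matrices containing a width-1 row, A's left and right border columns alias that row's single cell and A returns a matrix widened by a duplicated column (e.g. [[1],[2]] with no ops -> [[1,1],[2,2]]), while B returns the matrix with its original shape ([[1],[2]]), which is the intended result of simulating the operations. — e.g. on solution([[1], [2]], []): A returns [[1, 1], [2, 2]], B returns [[1], [2]]
-- outside the precondition, e.g. on solution([], ['ShiftRow']): A returns [], B raises IndexError; on solution([[1, 2]], ['Rotate']): A returns [[2, 1]], B returns [[1, 1], [2, 2]]
import Mathlib
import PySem

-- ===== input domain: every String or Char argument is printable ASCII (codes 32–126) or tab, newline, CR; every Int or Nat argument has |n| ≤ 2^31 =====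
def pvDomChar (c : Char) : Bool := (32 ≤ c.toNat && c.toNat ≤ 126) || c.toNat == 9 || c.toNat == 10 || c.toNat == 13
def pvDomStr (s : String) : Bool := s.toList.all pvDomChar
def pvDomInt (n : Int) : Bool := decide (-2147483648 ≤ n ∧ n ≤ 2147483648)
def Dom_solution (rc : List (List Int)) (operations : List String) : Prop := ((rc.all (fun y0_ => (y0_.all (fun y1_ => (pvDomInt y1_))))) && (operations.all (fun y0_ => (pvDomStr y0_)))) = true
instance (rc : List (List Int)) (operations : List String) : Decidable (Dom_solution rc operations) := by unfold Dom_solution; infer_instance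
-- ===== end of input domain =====

-- B replaces A's three mutable deques (middle rows / left column / right column) by a plain
-- list-of-rows matrix rebuilt per operation.  A mutates nothing observable (it copies rc
-- into deques); B copies rc too.  On matrices containing a width-1 row the two differ (D_ below).

-- ===== PORT A =====
-- Deques are ported as Lists.  Where Python raises on an empty deque or empty row
-- (popleft/pop/[0]/[-1]) — inputs Pre_solution excludes — the port takes a default
-- (headD/getLastD/getD); inside Pre_solution those defaults are never reached.
def rotateA (s : List (List Int) × List Int × List Int) : List (List Int) × List Int × List Int :=
  let left_top := s.2.1.headD 0                 -- left_col.popleft()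
  let left1 := s.2.1.tail
  let rows1 := match s.1 with                   -- rows[0].appendleft(left_top)
    | [] => ([] : List (List Int))
    | r0 :: rs => (left_top :: r0) :: rs
  let right_top := (rows1.headD []).getLastD 0  -- rows[0].pop()
  let rows2 := match rows1 with
    | [] => ([] : List (List Int))
    | r0 :: rs => r0.dropLast :: rs
  let right1 := right_top :: s.2.2              -- right_col.appendleft(right_top)
  let right_bottom := right1.getLastD 0         -- right_col.pop()
  let right2 := right1.dropLast
  let rows3 := rows2.dropLast ++ [rows2.getLastD [] ++ [right_bottom]]  -- rows[-1].append(...)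
  let left_bottom := (rows3.getLastD []).headD 0                         -- rows[-1].popleft()
  let rows4 := rows3.dropLast ++ [(rows3.getLastD []).tail]
  (rows4, left1 ++ [left_bottom], right2)       -- left_col.append(left_bottom)

-- deque.rotate(1): the last element moves to the front (no-op on an empty deque)
def rot1 {α : Type} : List α → List α
  | [] => []
  | x :: xs => (x :: xs).getLastD x :: (x :: xs).dropLast

def shiftA (s : List (List Int) × List Int × List Int) : List (List Int) × List Int × List Int :=
  (rot1 s.1, rot1 s.2.1, rot1 s.2.2)

-- final loop: answer.append([left_col.popleft()] + list(rows[i]) + [right_col.popleft()])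
def assembleA : List (List Int) → List Int → List Int → List (List Int)
  | [], _, _ => []
  | r :: rs, left, right =>
      (left.headD 0 :: (r ++ [right.headD 0])) :: assembleA rs left.tail right.tail

def solution (rc : List (List Int)) (operations : List String) : List (List Int) :=
  -- rows = [rc[i][1:-1]], left_col = [rc[i][0]], right_col = [rc[i][-1]]
  let s := operations.foldl (fun s op => if op == "Rotate" then rotateA s else shiftA s)
    (rc.map (fun row => PySem.List.slice row (some 1) (some (-1))),
     rc.map (fun row => (PySem.List.pyGet? row 0).getD 0),
     rc.map (fun row => (PySem.List.pyGet? row (-1)).getD 0))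
  assembleA s.1 s.2.1 s.2.2

-- ===== PORT B =====
-- m[0]/m[-1]/row[0]/row[-1] raise in Python on an empty list; Pre_solution excludes those
-- inputs and the port takes a default there.
def rotB (m : List (List Int)) : List (List Int) :=
  let top := m.headD []                                          -- m[0]
  let middles := PySem.List.slice m (some 1) (some (-1))         -- m[1:-1]
  let bottom := (PySem.List.pyGet? m (-1)).getD []               -- m[-1]
  let heads := middles.map (fun row => (PySem.List.pyGet? row 0).getD 0)
      ++ [(PySem.List.pyGet? bottom 0).getD 0]
  let lasts := (PySem.List.pyGet? top (-1)).getD 0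
      :: middles.map (fun row => (PySem.List.pyGet? row (-1)).getD 0)
  let newMid := (middles.zip ((PySem.List.slice heads (some 1) none).zip lasts)).map
    (fun p => p.2.1 :: (PySem.List.slice p.1 (some 1) (some (-1)) ++ [p.2.2]))
  (heads.headD 0 :: PySem.List.slice top none (some (-1)))
    :: (newMid ++ [PySem.List.slice bottom (some 1) none ++ [lasts.getLastD 0]])

def shiftB (m : List (List Int)) : List (List Int) :=
  (PySem.List.pyGet? m (-1)).getD [] :: PySem.List.slice m none (some (-1))     -- [m[-1]] + m[:-1]

def solution_alt (rc : List (List Int)) (operations : List String) : List (List Int) :=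
  -- m = [list(row) for row in rc]
  operations.foldl (fun m op => if op == "Rotate" then rotB m else shiftB m)
    (rc.map (fun row => row))

-- ===== PRECONDITION & SPEC =====
-- Pre_ excludes matrices with an empty row (A raises IndexError on rc[i][0]) and matrices with
-- fewer than 2 rows, where the border rotation is degenerate: A raises on an empty matrix with a
-- Rotate, and on a single row its aliased top/bottom deque produces an accidental shape no spec
-- covers (B's border walk gives a different equally arbitrary shape there).
def Pre_solution (rc : List (List Int)) (operations : List String) : Prop :=
  2 ≤ rc.length ∧ ∀ row ∈ rc, 1 ≤ row.length
instance (rc : List (List Int)) (operations : List String) : Decidable (Pre_solution rc operations) := by unfold Pre_solution; infer_instance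

def pvWitness_solution : List (List Int) × List String :=
  ([[1, 2, 3], [4, 5, 6], [7, 8, 9]], ["Rotate", "ShiftRow", "Rotate"])

-- On matrices containing a width-1 row, A's left and right border columns alias that row's
-- single cell and A returns a matrix widened by a duplicated column, while B returns the
-- matrix with its original shape, the intended result of simulating the operations.
def D_solution (rc : List (List Int)) (operations : List String) : Prop :=
  ∃ row ∈ rc, row.length = 1
instance (rc : List (List Int)) (operations : List String) : Decidable (D_solution rc operations) := by unfold D_solution; infer_instance

def Spec_solution (rc : List (List Int)) (operations : List String) (out : List (List Int)) : Prop := ¬ D_solution rc operations → out = solution_alt rc operations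
instance (rc : List (List Int)) (operations : List String) (out : List (List Int)) : Decidable (Spec_solution rc operations out) := by unfold Spec_solution; infer_instance

def pvDiffWitness_solution : List (List Int) × List String := ([[1], [2]], [])
def pvDiffWitnessOut_solution : (List (List Int)) × (List (List Int)) :=
  ([[1, 1], [2, 2]], [[1], [2]])

-- ===== CLAIM (what is proved, stated in full; the proofs are below) =====
def Claim_unchanged_solution : Prop := ∀ (rc : List (List Int)) (operations : List String), Dom_solution rc operations → Pre_solution rc operations → Spec_solution rc operations (solution rc operations)
def Claim_changed_solution : Prop := Dom_solution (pvDiffWitness_solution.1) (pvDiffWitness_solution.2) ∧ Pre_solution (pvDiffWitness_solution.1) (pvDiffWitness_solution.2) ∧ D_solution (pvDiffWitness_solution.1) (pvDiffWitness_solution.2) ∧ solution (pvDiffWitness_solution.1) (pvDiffWitness_solution.2) = pvDiffWitnessOut_solution.1 ∧ solution_alt (pvDiffWitness_solution.1) (pvDiffWitness_solution.2) = pvDiffWitnessOut_solution.2 ∧ pvDiffWitnessOut_solution.1 ≠ pvDiffWitnessOut_solution.2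

-- ===== LEMMAS AND PROOFS =====

-- the correspondence: A's (rows, left_col, right_col) state for the matrix m
def stateOf (m : List (List Int)) : List (List Int) × List Int × List Int :=
  (m.map (fun row => PySem.List.slice row (some 1) (some (-1))),
   m.map (fun row => (PySem.List.pyGet? row 0).getD 0),
   m.map (fun row => (PySem.List.pyGet? row (-1)).getD 0))

-- the invariant: at least 2 rows, every row at least 2 wide
def Rect (m : List (List Int)) : Prop := 2 ≤ m.length ∧ ∀ row ∈ m, 2 ≤ row.length

theorem pyget_zero {α : Type} (l : List α) : PySem.List.pyGet? l 0 = l.head? := by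
  cases l with
  | nil => rfl
  | cons x xs => simp [PySem.List.pyGet?, PySem.List.pyIdx?]

theorem pyget_neg_one {α : Type} (l : List α) : PySem.List.pyGet? l (-1) = l.getLast? := by
  cases l with
  | nil => rfl
  | cons x xs =>
    simp only [PySem.List.pyGet?, PySem.List.pyIdx?, List.length_cons]
    rw [if_neg (by omega), if_pos (by omega)]
    simp [List.getLast?_eq_getElem?]

theorem slice11 {α : Type} (l : List α) :
    PySem.List.slice l (some 1) (some (-1)) = l.tail.dropLast := by
  cases l with
  | nil => rfl
  | cons x xs =>
    simp [PySem.List.slice, PySem.List.clampIdx, List.dropLast_eq_take]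
    split_ifs <;> omega

theorem dropLast_append_getLastD {α : Type} (l : List α) (h : l ≠ []) (d : α) :
    l.dropLast ++ [l.getLast?.getD d] = l := by
  rw [List.getLast?_eq_some_getLast h]
  exact List.dropLast_concat_getLast h

theorem getLastD_cons_concat {α : Type} (x a d : α) (l : List α) :
    (x :: (l ++ [a])).getLast?.getD d = a := by
  rw [← List.cons_append, List.getLast?_concat]
  rfl

theorem dropLast_cons_concat {α : Type} (x a : α) (l : List α) :
    (x :: (l ++ [a])).dropLast = x :: l := by
  rw [← List.cons_append, List.dropLast_concat]

theorem rot1_concat {α : Type} (l : List α) (a : α) : rot1 (l ++ [a]) = a :: l := by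
  cases l with
  | nil => rfl
  | cons x xs =>
    show (x :: (xs ++ [a])).getLastD x :: (x :: (xs ++ [a])).dropLast = a :: x :: xs
    rw [← List.cons_append, List.getLastD_concat, List.dropLast_concat]

theorem rot1_map {α β : Type} (f : α → β) (l : List α) :
    rot1 (l.map f) = (rot1 l).map f := by
  rcases List.eq_nil_or_concat l with rfl | ⟨l', a, rfl⟩
  · rfl
  · simp [rot1_concat]

theorem mapN (ms : List (List Int)) (hs ls : List Int)
    (h1 : hs.length = ms.length) (h2 : ms.length ≤ ls.length) :
    (ms.zip (hs.zip ls)).map ((fun row => row.tail.dropLast) ∘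
        fun p => p.2.1 :: (p.1.tail.dropLast ++ [p.2.2])) = ms.map (fun row => row.tail.dropLast)
  ∧ (ms.zip (hs.zip ls)).map ((fun row => row.head?.getD 0) ∘
        fun p => p.2.1 :: (p.1.tail.dropLast ++ [p.2.2])) = hs
  ∧ (ms.zip (hs.zip ls)).map ((fun row => row.getLast?.getD 0) ∘
        fun p => p.2.1 :: (p.1.tail.dropLast ++ [p.2.2])) = ls.take ms.length := by
  induction ms generalizing hs ls with
  | nil =>
    cases hs with
    | nil => simp
    | cons h hs => simp at h1
  | cons r ms ih =>
    cases hs with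
    | nil => simp at h1
    | cons h hs =>
      cases ls with
      | nil => simp at h2
      | cons l ls =>
        simp only [List.length_cons] at h1 h2
        obtain ⟨e1, e2, e3⟩ := ih hs ls (by omega) (by omega)
        simp [e1, e2, e3, getLastD_cons_concat]

theorem heads_rejoin {α : Type} (f : List α → Int) (ms : List (List α)) (b0 b1 : Int) :
    ms.map f ++ [b0, b1] =
      (Option.map f ms.head?).getD b0 :: ((ms.map f ++ [b0]).tail ++ [b1]) := by
  cases ms <;> simp

theorem take_getLastD {α : Type} (X : List α) (n : Nat) (d : α) (h : X.length = n + 1) :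
    X.take n ++ [X.getLast?.getD d] = X := by
  have h1 : X.take n = X.dropLast := by rw [List.dropLast_eq_take]; congr 1; omega
  rw [h1]
  exact dropLast_append_getLastD X (by rintro rfl; simp at h) d

theorem rot_comm (m : List (List Int)) (hm : Rect m) :
    rotateA (stateOf m) = stateOf (rotB m) := by
  obtain ⟨hlen, hrows⟩ := hm
  cases m with
  | nil => simp at hlen
  | cons t rest =>
    rcases List.eq_nil_or_concat rest with rfl | ⟨ms, b, rfl⟩
    · simp at hlen
    · have ht : 2 ≤ t.length := hrows t (by simp)
      have hb : 2 ≤ b.length := hrows b (by simp)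
      rcases t with _ | ⟨t0, _ | ⟨t1, t''⟩⟩ <;> simp at ht
      rcases b with _ | ⟨b0, _ | ⟨b1, b''⟩⟩ <;> simp at hb
      obtain ⟨e1, e2, e3⟩ := mapN ms
        ((ms.map (fun row => row.head?.getD 0) ++ [b0]).tail)
        ((t1 :: t'').getLast?.getD 0 :: ms.map (fun row => row.getLast?.getD 0))
        (by simp) (by simp)
      simp [stateOf, rotateA, rotB, slice11, pyget_zero, pyget_neg_one,
        PySem.List.slice_to_neg_one, PySem.List.slice_from_one, List.concat_eq_append,
        List.map_append, dropLast_append_getLastD,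
        getLastD_cons_concat, dropLast_cons_concat, e1, e2, e3]
      refine ⟨?_, ?_⟩
      · exact heads_rejoin _ ms b0 b1
      · exact (take_getLastD _ _ 0 (by simp)).symm

theorem shiftB_eq_rot1 (m : List (List Int)) (hm : m ≠ []) : shiftB m = rot1 m := by
  rcases List.eq_nil_or_concat m with rfl | ⟨l, a, rfl⟩
  · exact absurd rfl hm
  · simp [shiftB, rot1_concat, pyget_neg_one, PySem.List.slice_to_neg_one]

theorem shift_comm (m : List (List Int)) (hm : m ≠ []) :
    shiftA (stateOf m) = stateOf (shiftB m) := by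
  rw [shiftB_eq_rot1 m hm]
  simp [shiftA, stateOf, rot1_map]

theorem rect_rotB (m : List (List Int)) (hm : Rect m) : Rect (rotB m) := by
  obtain ⟨hlen, hrows⟩ := hm
  cases m with
  | nil => simp at hlen
  | cons t rest =>
    rcases List.eq_nil_or_concat rest with rfl | ⟨ms, b, rfl⟩
    · simp at hlen
    · have ht : 2 ≤ t.length := hrows t (by simp)
      have hb : 2 ≤ b.length := hrows b (by simp [List.concat_eq_append])
      rcases t with _ | ⟨t0, _ | ⟨t1, t''⟩⟩ <;> simp at ht
      rcases b with _ | ⟨b0, _ | ⟨b1, b''⟩⟩ <;> simp at hb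
      constructor
      · simp [rotB]
      · intro row hrow
        simp only [rotB, slice11, pyget_zero, pyget_neg_one, List.concat_eq_append,
          PySem.List.slice_from_one, PySem.List.slice_to_neg_one,
          getLastD_cons_concat, List.mem_cons, List.mem_append,
          List.mem_map, List.mem_nil_iff, or_false] at hrow
        rcases hrow with rfl | ⟨p, _, rfl⟩ | rfl <;> simp

theorem rect_shiftB (m : List (List Int)) (hm : Rect m) : Rect (shiftB m) := by
  obtain ⟨hlen, hrows⟩ := hm
  have hne : m ≠ [] := by rintro rfl; simp at hlen
  rw [shiftB_eq_rot1 m hne]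
  rcases List.eq_nil_or_concat m with rfl | ⟨l, a, rfl⟩
  · exact absurd rfl hne
  · simp only [List.concat_eq_append] at hlen hrows ⊢
    rw [rot1_concat]
    constructor
    · simpa using hlen
    · intro row hrow
      rcases List.mem_cons.mp hrow with rfl | h
      · exact hrows row (by simp)
      · exact hrows row (by simp [h])

theorem fold_inv (ops : List String) (m : List (List Int)) (hm : Rect m) :
    ops.foldl (fun s op => if op == "Rotate" then rotateA s else shiftA s) (stateOf m)
      = stateOf (ops.foldl (fun m op => if op == "Rotate" then rotB m else shiftB m) m)
    ∧ Rect (ops.foldl (fun m op => if op == "Rotate" then rotB m else shiftB m) m) := by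
  induction ops generalizing m with
  | nil => exact ⟨rfl, hm⟩
  | cons op ops ih =>
    simp only [List.foldl_cons]
    by_cases h : op == "Rotate"
    · simp only [h, if_pos]
      rw [rot_comm m hm]
      exact ih (rotB m) (rect_rotB m hm)
    · simp only [h]
      rw [if_neg (by simp_all), if_neg (by simp_all),
        shift_comm m (by rintro rfl; exact absurd hm.1 (by simp))]
      exact ih (shiftB m) (rect_shiftB m hm)

theorem assemble_state (m : List (List Int)) (h : ∀ row ∈ m, 2 ≤ row.length) :
    assembleA (stateOf m).1 (stateOf m).2.1 (stateOf m).2.2 = m := by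
  induction m with
  | nil => rfl
  | cons r ms ih =>
    have hr : 2 ≤ r.length := h r (by simp)
    rcases r with _ | ⟨r0, _ | ⟨r1, r''⟩⟩ <;> simp at hr
    have := ih (fun row hrow => h row (by simp [hrow]))
    simp only [stateOf, List.map_cons, assembleA, List.tail_cons] at this ⊢
    rw [this]
    simp [slice11, pyget_zero, pyget_neg_one, dropLast_append_getLastD]

-- ===== VERDICT (by name: the statements are the Claim_ definitions above) =====
theorem solution_spec : Claim_unchanged_solution := by
  intro rc operations _ hpre hD
  show solution rc operations = solution_alt rc operations
  have hrect : Rect rc := by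
    refine ⟨hpre.1, fun row hrow => ?_⟩
    have h1 := hpre.2 row hrow
    have h2 : row.length ≠ 1 := fun h => hD ⟨row, hrow, h⟩
    omega
  unfold solution solution_alt
  rw [List.map_id']
  rw [show (rc.map (fun row => PySem.List.slice row (some 1) (some (-1))),
     rc.map (fun row => (PySem.List.pyGet? row 0).getD 0),
     rc.map (fun row => (PySem.List.pyGet? row (-1)).getD 0)) = stateOf rc from rfl,
    (fold_inv operations rc hrect).1]
  exact assemble_state _ fun row hrow => (fold_inv operations rc hrect).2.2 row hrow

theorem solution_changed : Claim_changed_solution := by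
  unfold Claim_changed_solution; decide
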